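-- pv_equiv track=rewrite | github.com/Bismarrck/tensoralloy | tensoralloy/utils.py | get_elements_from_kbody_term
-- ===== SOURCE A (Python) =====
-- from typing import List, Union, Any
--
-- def get_elements_from_kbody_term(kbody_term: str) -> List[str]:
--     """
--     Return the atoms in the given k-body term.
--
--     Parameters
--     ----------
--     kbody_term : str
--         A str as the k-body term.
--
--     Returns
--     -------
--     elements : List
--         A list of str as the elements of the k-body term.
--
--     """
--     sel = [0]
--     for i in range(len(kbody_term)):
--         if kbody_term[i].isupper():
--             sel.append(i + 1)
--         else:
--             sel[-1] += 1
--     atoms = []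
--     for i in range(len(sel) - 1):
--         atoms.append(kbody_term[sel[i]: sel[i + 1]])
--     return atoms
-- ===== SOURCE B (Python) =====
-- from typing import List
--
--
-- def get_elements_from_kbody_term(kbody_term: str) -> List[str]:
--     """
--     Return the atoms in the given k-body term.
--
--     Single pass: an uppercase character starts a new element, any other
--     character extends the current element (characters before the first
--     uppercase one are dropped, as in the original).
--     """
--     elements = []
--     for ch in kbody_term:
--         if ch.isupper():
--             elements.append(ch)
--         elif elements:
--             elements[-1] += ch
--     return elements
-- ===== Notes on version B (the rewrite author's own statement) =====
-- stated objective: simpler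
-- what changed: Builds the element list directly in one pass over the characters (uppercase starts a new element, other characters extend the last one) instead of first accumulating a boundary-index table and then slicing the string in a second loop.
import Mathlib
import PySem

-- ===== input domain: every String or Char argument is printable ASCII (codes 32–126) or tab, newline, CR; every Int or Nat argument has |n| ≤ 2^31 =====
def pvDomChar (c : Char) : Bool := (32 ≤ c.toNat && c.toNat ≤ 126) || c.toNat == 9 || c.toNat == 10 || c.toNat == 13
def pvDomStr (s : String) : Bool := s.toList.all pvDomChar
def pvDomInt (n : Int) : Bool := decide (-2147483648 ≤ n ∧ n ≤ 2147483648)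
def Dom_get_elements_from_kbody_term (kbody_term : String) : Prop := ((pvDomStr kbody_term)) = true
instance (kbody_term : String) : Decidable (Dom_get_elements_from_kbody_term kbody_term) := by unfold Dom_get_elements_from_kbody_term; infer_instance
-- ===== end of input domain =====

-- B builds the element list in one pass (uppercase starts a new element, other chars extend
-- the last one) instead of A's boundary-index table followed by a slicing loop.

-- ===== PORT A =====
-- literal port of A: first loop builds the boundary list `sel`, the second slices the string.
def get_elements_from_kbody_term (kbody_term : String) : List String :=
  let sel : List Int :=
    (PySem.List.pyRange 0 (kbody_term.toList.length : Int) 1).foldl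
      (fun sel i =>
        if PySem.Chars.isupper (PySem.List.pyGetD kbody_term.toList i ' ')
        then sel ++ [i + 1]                                      -- sel.append(i + 1)
        else sel.dropLast ++ [PySem.List.pyGetD sel (-1) 0 + 1]) -- sel[-1] += 1
      [0]
  (PySem.List.pyRange 0 ((sel.length : Int) - 1) 1).foldl
    (fun atoms i =>
      atoms ++ [PySem.Str.slice kbody_term
        (some (PySem.List.pyGetD sel i 0)) (some (PySem.List.pyGetD sel (i + 1) 0))])
    []

-- ===== PORT B =====
-- `elements[-1] += ch` guarded by `elif elements:`: extend the last group, no-op on [].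
def pvExtendLast : List (List Char) → Char → List (List Char)
  | [], _ => []
  | [g], c => [g ++ [c]]
  | g :: gs, c => g :: pvExtendLast gs c

-- literal port of Source B; elements are kept as code-point lists and turned into Strings at return.
def get_elements_from_kbody_term_alt (kbody_term : String) : List String :=
  (kbody_term.toList.foldl
    (fun elements ch =>
      if PySem.Chars.isupper ch then elements ++ [[ch]]   -- elements.append(ch)
      else pvExtendLast elements ch)                      -- elif elements: elements[-1] += ch
    []).map (fun g => String.ofList g)

-- ===== PRECONDITION & SPEC =====
def Spec_get_elements_from_kbody_term (kbody_term : String) (out : List String) : Prop := out = get_elements_from_kbody_term_alt kbody_term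
instance (kbody_term : String) (out : List String) : Decidable (Spec_get_elements_from_kbody_term kbody_term out) := by unfold Spec_get_elements_from_kbody_term; infer_instance

-- ===== CLAIM (what is proved, stated in full; the proofs are below) =====
def Claim_equal_get_elements_from_kbody_term : Prop := ∀ (kbody_term : String), Dom_get_elements_from_kbody_term kbody_term → Spec_get_elements_from_kbody_term kbody_term (get_elements_from_kbody_term kbody_term)

-- ===== LEMMAS AND PROOFS =====

-- indices (offset by k) of the uppercase characters of a list
def pvUidx (k : Nat) : List Char → List Nat
  | [] => []
  | c :: cs => if PySem.Chars.isupper c then k :: pvUidx (k + 1) cs else pvUidx (k + 1) cs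

-- the segments of s cut at consecutive boundaries
def pvSegs (s : List Char) : List Nat → List (List Char)
  | a :: b :: r => (s.drop a).take (b - a) :: pvSegs s (b :: r)
  | _ => []

theorem pvUidx_snoc (p : List Char) (c : Char) : ∀ k, pvUidx k (p ++ [c]) =
    pvUidx k p ++ (if PySem.Chars.isupper c then [k + p.length] else []) := by
  induction p with
  | nil => intro k; by_cases h : PySem.Chars.isupper c <;> simp [pvUidx, h]
  | cons a p ih =>
      intro k
      by_cases h : PySem.Chars.isupper a <;>
        by_cases hc : PySem.Chars.isupper c <;>
          simp [pvUidx, h, hc, ih (k + 1)] <;> omega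

theorem pvUidx_le (p : List Char) : ∀ k x, x ∈ pvUidx k p → k ≤ x ∧ x < k + p.length := by
  induction p with
  | nil => intro k x hx; simp [pvUidx] at hx
  | cons a p ih =>
      intro k x hx
      by_cases h : PySem.Chars.isupper a <;> simp [pvUidx, h] at hx
      · rcases hx with rfl | hx
        · simp only [List.length_cons]; omega
        · have := ih (k + 1) x hx; simp only [List.length_cons]; omega
      · have := ih (k + 1) x hx; simp only [List.length_cons]; omega

theorem pvSegs_snoc (s : List Char) (ns : List Nat) (hne : ns ≠ []) (m : Nat) :
    pvSegs s (ns ++ [m]) = pvSegs s ns ++ [(s.drop (ns.getLast hne)).take (m - ns.getLast hne)] := by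
  induction ns with
  | nil => simp at hne
  | cons a t ih =>
      cases t with
      | nil => simp [pvSegs]
      | cons b r =>
          have h := ih (by simp)
          show (s.drop a).take (b - a) :: pvSegs s (b :: (r ++ [m])) = _
          rw [show b :: (r ++ [m]) = (b :: r) ++ [m] from rfl, h]
          simp [pvSegs, List.getLast_cons]

theorem pvSegs_stable (p q : List Char) : ∀ ns : List Nat, (∀ x ∈ ns, x ≤ p.length) →
    pvSegs (p ++ q) ns = pvSegs p ns := by
  intro ns
  induction ns with
  | nil => intro _; simp [pvSegs]
  | cons a t ih =>
      intro hb
      cases t with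
      | nil => simp [pvSegs]
      | cons b r =>
          have ha : a ≤ p.length := hb a (by simp)
          have hbb : b ≤ p.length := hb b (by simp)
          simp only [pvSegs]
          rw [ih (by intro x hx; exact hb x (by simp [hx]))]
          congr 1
          rw [List.drop_append_of_le_length ha, List.take_append_of_le_length (by
            simp only [List.length_drop]; omega)]

theorem pvSegs_length (s : List Char) : ∀ ns : List Nat, (pvSegs s ns).length = ns.length - 1 := by
  intro ns
  induction ns with
  | nil => simp [pvSegs]
  | cons a t ih =>
      cases t with
      | nil => simp [pvSegs]
      | cons b r => simp [pvSegs] at ih ⊢; omega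

theorem pvSegs_getElem (s : List Char) : ∀ (ns : List Nat) (k : Nat) (h : k + 1 < ns.length)
    (h' : k < (pvSegs s ns).length),
    (pvSegs s ns)[k] = (s.drop (ns.getD k 0)).take (ns.getD (k + 1) 0 - ns.getD k 0) := by
  intro ns
  induction ns with
  | nil => intro k h _; simp at h
  | cons a t ih =>
      intro k h h'
      cases t with
      | nil => simp at h
      | cons b r =>
          cases k with
          | zero => simp [pvSegs]
          | succ k =>
              have h2 : k + 1 < (b :: r).length := by simpa using h
              have h2' : k < (pvSegs s (b :: r)).length := by
                simp only [pvSegs_length] at h' ⊢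
                simp only [List.length_cons] at h' ⊢
                omega
              simp only [pvSegs, List.getElem_cons_succ, List.getD_cons_succ]
              exact ih k h2 h2'

theorem pvExtendLast_snoc (L : List (List Char)) (g : List Char) (c : Char) :
    pvExtendLast (L ++ [g]) c = L ++ [g ++ [c]] := by
  induction L with
  | nil => simp [pvExtendLast]
  | cons a t ih =>
      cases t with
      | nil => simp [pvExtendLast]
      | cons b r => simp only [List.cons_append] at ih ⊢; simp [pvExtendLast, ih]

-- the sel-building loop of A computes the uppercase indices followed by the prefix length
theorem pvSelA (cs : List Char) (n : Nat) (hn : n ≤ cs.length) :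
    (PySem.List.pyRange 0 (n : Int) 1).foldl
      (fun sel i =>
        if PySem.Chars.isupper (PySem.List.pyGetD cs i ' ')
        then sel ++ [i + 1]
        else sel.dropLast ++ [PySem.List.pyGetD sel (-1) 0 + 1])
      [0]
    = (pvUidx 0 (cs.take n) ++ [n]).map (fun m => Int.ofNat m) := by
  induction n with
  | zero => simp [pvUidx]
  | succ n ih =>
      have hn' : n ≤ cs.length := by omega
      have hlt : n < cs.length := by omega
      have hrange : PySem.List.pyRange 0 ((n : Int) + 1) 1 =
          PySem.List.pyRange 0 (n : Int) 1 ++ [(n : Int)] :=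
        PySem.List.pyRange_one_succ_right (by positivity)
      have hcast : ((n + 1 : Nat) : Int) = (n : Int) + 1 := by push_cast; ring
      rw [hcast, hrange, List.foldl_append, ih hn']
      have hget : PySem.List.pyGetD cs (n : Int) ' ' = cs[n]'hlt := by
        rw [PySem.List.pyGetD_natCast, List.getD_eq_getElem cs ' ' hlt]
      have htake : cs.take (n + 1) = cs.take n ++ [cs[n]'hlt] := by
        rw [List.take_add_one]
        simp [List.getElem?_eq_getElem hlt]
      simp only [List.foldl_cons, List.foldl_nil, hget]
      by_cases h : PySem.Chars.isupper (cs[n]'hlt)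
      · rw [if_pos h, htake, pvUidx_snoc, if_pos h]
        simp only [List.length_take, Nat.min_eq_left hn', Nat.zero_add, List.map_append,
          List.map_cons, List.map_nil, List.append_assoc]
        simp only [Int.ofNat_eq_natCast, Nat.cast_add, Nat.cast_one]
      · rw [if_neg h, htake, pvUidx_snoc, if_neg h, List.append_nil]
        simp only [List.map_append, List.map_cons, List.map_nil]
        rw [List.dropLast_concat, PySem.List.pyGetD_neg_one_append_singleton]
        simp only [Int.ofNat_eq_natCast, Nat.cast_add, Nat.cast_one]

-- the one-pass loop of B computes exactly the segments between those boundaries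
theorem pvFoldB (cs : List Char) :
    cs.foldl
      (fun elements ch =>
        if PySem.Chars.isupper ch then elements ++ [[ch]] else pvExtendLast elements ch)
      []
    = pvSegs cs (pvUidx 0 cs ++ [cs.length]) := by
  induction cs using List.reverseRecOn with
  | nil => simp [pvUidx, pvSegs]
  | append_singleton p c ih =>
      rw [List.foldl_append, List.foldl_cons, List.foldl_nil, ih]
      have hbound : ∀ x ∈ pvUidx 0 p, x ≤ p.length := by
        intro x hx
        have := (pvUidx_le p 0 x hx).2
        omega
      have hstab : pvSegs (p ++ [c]) (pvUidx 0 p) = pvSegs p (pvUidx 0 p) :=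
        pvSegs_stable p [c] _ hbound
      by_cases h : PySem.Chars.isupper c
      · rw [if_pos h, pvUidx_snoc, if_pos h]
        simp only [Nat.zero_add, List.append_assoc, List.singleton_append]
        rw [show pvUidx 0 p ++ [p.length, (p ++ [c]).length] =
              (pvUidx 0 p ++ [p.length]) ++ [(p ++ [c]).length] from by simp,
            pvSegs_snoc (p ++ [c]) _ (by simp) _, List.getLast_append_singleton]
        have hstab2 : pvSegs (p ++ [c]) (pvUidx 0 p ++ [p.length]) =
            pvSegs p (pvUidx 0 p ++ [p.length]) := by
          apply pvSegs_stable
          intro x hx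
          rcases List.mem_append.1 hx with hx | hx
          · exact hbound x hx
          · simp at hx; omega
        rw [hstab2]
        congr 1
        simp only [List.length_append, List.length_cons, List.length_nil]
        rw [List.drop_left, show p.length + (1 + 0) - p.length = 1 from by omega]
        simp
      · rw [if_neg h, pvUidx_snoc, if_neg h, List.append_nil]
        by_cases hu : pvUidx 0 p = []
        · simp [hu, pvSegs, pvExtendLast]
        · have hlast : (pvUidx 0 p).getLast hu < p.length := by
            have := (pvUidx_le p 0 _ (List.getLast_mem hu)).2
            omega
          rw [pvSegs_snoc p _ hu, pvExtendLast_snoc, pvSegs_snoc (p ++ [c]) _ hu,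
            pvSegs_stable p [c] _ hbound]
          congr 1
          rw [List.drop_append_of_le_length (le_of_lt hlast)]
          rw [List.take_of_length_le (by simp only [List.length_drop]; omega),
            List.take_of_length_le (by
              simp only [List.length_append, List.length_drop, List.length_cons,
                List.length_nil]
              omega)]

theorem get_elements_from_kbody_term_spec : Claim_equal_get_elements_from_kbody_term := by
  intro s _
  unfold Spec_get_elements_from_kbody_term
  unfold get_elements_from_kbody_term get_elements_from_kbody_term_alt
  rw [pvSelA s.toList s.toList.length le_rfl, List.take_length, pvFoldB]
  set cs := s.toList with hcs
  set ns := pvUidx 0 cs ++ [cs.length] with hns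
  rw [PySem.List.foldl_append_singleton_eq_map, List.nil_append]
  have hlenns : 1 ≤ ns.length := by simp [hns]
  apply List.ext_getElem
  · simp only [List.length_map, PySem.List.length_pyRange_one, pvSegs_length,
      List.length_map]
    omega
  · intro i h1 h2
    have hlen1 : i < ((ns.map (fun m => Int.ofNat m)).length : Int).toNat - 1 := by
      simpa [PySem.List.length_pyRange_one] using h1
    have hilt : i + 1 < ns.length := by
      simp only [List.length_map] at hlen1
      omega
    have hilt0 : i < ns.length := by omega
    have hgd : ∀ j : Nat, j < ns.length →
        PySem.List.pyGetD (ns.map (fun m => Int.ofNat m)) (j : Int) 0 = ((ns.getD j 0 : Nat) : Int) := by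
      intro j hj
      rw [PySem.List.pyGetD_natCast]
      rw [List.getD_eq_getElem _ _ (by simpa using hj), List.getElem_map,
        List.getD_eq_getElem _ _ hj]
      rfl
    simp only [List.getElem_map, PySem.List.getElem_pyRange_one, Int.zero_add]
    rw [hgd i hilt0, show (i : Int) + 1 = ((i + 1 : Nat) : Int) from by push_cast; ring,
      hgd (i + 1) hilt]
    rw [pvSegs_getElem cs ns i hilt (by simpa using h2)]
    unfold PySem.Str.slice
    congr 1
    rw [show PySem.Chars.slice s.toList (some ((ns.getD i 0 : Nat) : Int))
          (some ((ns.getD (i + 1) 0 : Nat) : Int)) =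
        PySem.List.slice s.toList (some ((ns.getD i 0 : Nat) : Int))
          (some ((ns.getD (i + 1) 0 : Nat) : Int)) from by
      simp [PySem.Chars.slice_eq_listSlice]]
    rw [PySem.List.slice_natCast]
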